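-- pv_equiv track=rewrite | github.com/indrag49/Computational-Stat-Mech | Chapter 4/Naive-degeneracy.py | Naive_degeneracy
-- ===== SOURCE A (Python) =====
-- def Naive_degeneracy(Emax):
--     N=[0]*(Emax+1)
--     for Ex in range(Emax+1):
--         for Ey in range(Emax+1):
--             for Ez in range(Emax+1):
--                 E=Ex+Ey+Ez
--                 if E<=Emax:
--                     N[E]+=1
--     return N
-- ===== SOURCE B (Python) =====
-- def Naive_degeneracy(Emax):
--     # stars-and-bars: the count of nonnegative triples with a given sum is a quadratic in that sum
--     return [(E + 1) * (E + 2) // 2 for E in range(Emax + 1)]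
-- ===== Notes on version B (the rewrite author's own statement) =====
-- stated objective: faster
-- what changed: replaces the triple nested loop that counts triples with the stars-and-bars closed form for the number of nonnegative triples of a given sum (a quadratic in E), computed in a single comprehension
import Mathlib
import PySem

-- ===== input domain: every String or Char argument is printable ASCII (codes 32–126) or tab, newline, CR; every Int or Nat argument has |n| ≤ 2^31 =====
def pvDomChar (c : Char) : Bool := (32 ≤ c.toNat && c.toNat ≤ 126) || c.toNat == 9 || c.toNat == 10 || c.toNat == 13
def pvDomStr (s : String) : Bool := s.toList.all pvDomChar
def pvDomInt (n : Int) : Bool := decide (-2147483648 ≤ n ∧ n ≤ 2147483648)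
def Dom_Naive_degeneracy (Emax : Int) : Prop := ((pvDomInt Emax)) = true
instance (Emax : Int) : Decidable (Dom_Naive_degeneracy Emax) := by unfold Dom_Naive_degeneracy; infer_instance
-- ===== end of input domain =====

-- B replaces A's triple counting loop by the stars-and-bars closed form for the number of nonnegative triples of each sum (measured faster).


-- ===== PORT A =====
def Naive_degeneracy (Emax : Int) : List Int :=
  let N0 : List Int := List.replicate (Emax + 1).toNat 0
  (PySem.List.pyRange 0 (Emax + 1) 1).foldl (fun N Ex =>
    (PySem.List.pyRange 0 (Emax + 1) 1).foldl (fun N Ey =>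
      (PySem.List.pyRange 0 (Emax + 1) 1).foldl (fun N Ez =>
        let E := Ex + Ey + Ez
        if E ≤ Emax then PySem.List.pySetD N E (PySem.List.pyGetD N E 0 + 1) else N) N) N) N0

-- ===== PORT B =====
def Naive_degeneracy_alt (Emax : Int) : List Int :=
  (PySem.List.pyRange 0 (Emax + 1) 1).map (fun E => PySem.Int.floordiv ((E + 1) * (E + 2)) 2)

-- ===== PRECONDITION & SPEC =====
def Spec_Naive_degeneracy (Emax : Int) (out : List Int) : Prop := out = Naive_degeneracy_alt Emax
instance (Emax : Int) (out : List Int) : Decidable (Spec_Naive_degeneracy Emax out) := by unfold Spec_Naive_degeneracy; infer_instance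

-- ===== CLAIM (what is proved, stated in full; the proofs are below) =====
def Claim_equal_Naive_degeneracy : Prop := ∀ (Emax : Int), Dom_Naive_degeneracy Emax → Spec_Naive_degeneracy Emax (Naive_degeneracy Emax)

-- ===== LEMMAS AND PROOFS =====

-- the increment N[E] += 1 as a single operation (proof helper)
def pvBump (N : List Int) (E : Int) : List Int :=
  PySem.List.pySetD N E (PySem.List.pyGetD N E 0 + 1)

-- the flat list of all triple sums Ex+Ey+Ez produced by A's three nested loops
def pvT (Emax : Int) : List Int :=
  (PySem.List.pyRange 0 (Emax + 1) 1).flatMap (fun Ex =>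
    (PySem.List.pyRange 0 (Emax + 1) 1).flatMap (fun Ey =>
      (PySem.List.pyRange 0 (Emax + 1) 1).map (fun Ez => Ex + Ey + Ez)))

theorem pvBump_length (N : List Int) (E : Int) : (pvBump N E).length = N.length := by
  simp [pvBump, PySem.List.length_pySetD]

theorem pv_foldl_bump_length (L : List Int) (N : List Int) :
    (L.foldl pvBump N).length = N.length := by
  induction L generalizing N with
  | nil => rfl
  | cons E L ih => simp [List.foldl_cons, ih, pvBump_length]

theorem pv_setD_getD (N : List Int) (i v : Int) (k : Nat) (h0 : 0 ≤ i) :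
    (PySem.List.pySetD N i v).getD k 0 =
      if (k : Int) = i ∧ k < N.length then v else N.getD k 0 := by
  rw [PySem.List.pySetD_of_nonneg _ _ h0]
  rcases Nat.lt_or_ge k N.length with hk | hk
  · rw [List.getD_eq_getElem _ _ (by simpa using hk), List.getD_eq_getElem _ _ hk,
      List.getElem_set]
    split_ifs with h1 h2 h3 <;> first | rfl | omega
  · rw [List.getD_eq_default, List.getD_eq_default _ _ hk]
    · rw [if_neg]; omega
    · simpa using hk

theorem pvBump_getD (N : List Int) (E : Int) (k : Nat) (h0 : 0 ≤ E) :
    (pvBump N E).getD k 0 =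
      if (k : Int) = E ∧ k < N.length then N.getD k 0 + 1 else N.getD k 0 := by
  unfold pvBump
  rw [pv_setD_getD _ _ _ _ h0]
  by_cases hc : (k : Int) = E ∧ k < N.length
  · rw [if_pos hc, if_pos hc, ← hc.1]
    simp
  · rw [if_neg hc, if_neg hc]

theorem pv_foldl_bump_getD (L : List Int) (N : List Int)
    (hL : ∀ E ∈ L, 0 ≤ E ∧ E < (N.length : Int)) (k : Nat) (hk : k < N.length) :
    (L.foldl pvBump N).getD k 0 = N.getD k 0 + (L.count (k : Int) : Int) := by
  induction L generalizing N with
  | nil => simp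
  | cons E L ih =>
    obtain ⟨hE0, hElen⟩ := hL E List.mem_cons_self
    have hlenb := pvBump_length N E
    rw [List.foldl_cons,
      ih (pvBump N E) (fun F hF => by
        have := hL F (List.mem_cons_of_mem _ hF); rwa [hlenb]) (by rwa [hlenb]),
      pvBump_getD N E k hE0, List.count_cons]
    by_cases hke : (k : Int) = E
    · rw [if_pos ⟨hke, hk⟩]
      simp only [hke, BEq.rfl, if_true]
      push_cast
      ring
    · rw [if_neg (by tauto)]
      simp [Ne.symm hke]

theorem pvA_eq_flat (Emax : Int) :
    Naive_degeneracy Emax =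
      ((pvT Emax).filter (fun E => decide (E ≤ Emax))).foldl pvBump
        (List.replicate (Emax + 1).toNat 0) := by
  unfold Naive_degeneracy pvT
  rw [List.foldl_filter]
  simp only [List.foldl_flatMap, List.foldl_map, decide_eq_true_eq, pvBump]

theorem pv_innerSum (n c k : Nat) :
    ((List.range n).map (fun y => if c + y ≤ k then 1 else 0)).sum = min (k + 1 - c) n := by
  induction n with
  | zero => simp
  | succ n ih =>
    rw [List.range_succ, List.map_append, List.sum_append, ih]
    simp only [List.map_cons, List.map_nil, List.sum_cons, List.sum_nil]
    split_ifs <;> omega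

theorem pv_gauss (m : Nat) :
    2 * ((List.range m).map (fun x => m - x)).sum = m * (m + 1) := by
  induction m with
  | zero => simp
  | succ m ih =>
    rw [List.range_succ_eq_map]
    simp only [List.map_cons, List.map_map, List.sum_cons]
    have hfun : ((fun x => m + 1 - x) ∘ Nat.succ) = (fun x : Nat => m - x) := by
      funext x; simp [Function.comp]
    rw [hfun]
    calc 2 * (m + 1 - 0 + ((List.range m).map (fun x => m - x)).sum)
        = 2 * (m + 1) + 2 * ((List.range m).map (fun x => m - x)).sum := by ring_nf; omega
      _ = 2 * (m + 1) + m * (m + 1) := by rw [ih]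
      _ = (m + 1) * (m + 1 + 1) := by ring

theorem pv_outerSum (n k : Nat) (hk : k < n) :
    ((List.range n).map (fun x => min (k + 1 - x) n)).sum = (k + 1) * (k + 2) / 2 := by
  obtain ⟨m, rfl⟩ : ∃ m, n = (k + 1) + m := ⟨n - (k + 1), by omega⟩
  rw [List.range_add, List.map_append, List.sum_append, List.map_map]
  rw [List.map_congr_left (g := fun x => k + 1 - x)
    (fun x hx => by have := List.mem_range.1 hx; simp only; omega)]
  rw [List.sum_eq_zero (l := (List.range m).map ((fun x => min (k + 1 - x) (k + 1 + m)) ∘ (k + 1 + ·)))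
    (by intro x hx
        obtain ⟨y, hy, rfl⟩ := List.mem_map.1 hx
        simp [Function.comp])]
  have h2 := pv_gauss (k + 1)
  generalize hP : (k + 1) * (k + 1 + 1) = P at h2 ⊢
  omega

theorem pv_key (n k : Nat) (hk : k < n) :
    ((List.range n).map (fun x =>
      ((List.range n).map (fun y => if x + y ≤ k then 1 else 0)).sum)).sum
      = (k + 1) * (k + 2) / 2 := by
  simp only [pv_innerSum]
  exact pv_outerSum n k hk

theorem pv_count_T (Emax : Int) (k : Nat) (hk : (k : Int) ≤ Emax) :
    (pvT Emax).count (k : Int) = (k + 1) * (k + 2) / 2 := by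
  unfold pvT
  rw [List.count_flatMap]
  rw [List.map_congr_left (g := fun Ex =>
      ((PySem.List.pyRange 0 (Emax + 1) 1).map
        (fun Ey => if Ex + Ey ≤ (k : Int) then 1 else 0)).sum) ?_]
  · -- convert the Int ranges to Nat ranges and use the Nat identity
    simp only [PySem.List.pyRange_one, List.map_map, Function.comp_def, zero_add, sub_zero]
    simp only [show ∀ (x y : Nat), (((x : Int) + (y : Int) ≤ (k : Int)) ↔ (x + y ≤ k)) from
      fun x y => by exact_mod_cast Iff.rfl]
    exact pv_key (Emax + 1).toNat k (by omega)
  · intro Ex hEx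
    obtain ⟨hEx0, hExlt⟩ := PySem.List.mem_pyRange_one.1 hEx
    simp only [Function.comp]
    rw [List.count_flatMap]
    apply congrArg List.sum
    apply List.map_congr_left
    intro Ey hEy
    obtain ⟨hEy0, hEylt⟩ := PySem.List.mem_pyRange_one.1 hEy
    simp only [Function.comp]
    have hrepr : (k : Int) = Ex + Ey + ((k : Int) - Ex - Ey) := by ring
    rw [hrepr, List.count_map_of_injective _ _ (fun a b hab => by omega)]
    by_cases hc : Ex + Ey ≤ (k : Int)
    · rw [if_pos (by omega)]
      exact List.count_eq_one_of_mem (PySem.List.nodup_pyRange_one _ _)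
        (PySem.List.mem_pyRange_one.2 ⟨by omega, by omega⟩)
    · rw [if_neg (by omega)]
      exact List.count_eq_zero_of_not_mem
        (fun hmem => by have := PySem.List.mem_pyRange_one.1 hmem; omega)

theorem pv_mem_T_nonneg (Emax : Int) (E : Int) (hE : E ∈ pvT Emax) : 0 ≤ E := by
  simp only [pvT, List.mem_flatMap, List.mem_map, PySem.List.mem_pyRange_one] at hE
  obtain ⟨Ex, ⟨hx0, -⟩, Ey, ⟨hy0, -⟩, Ez, ⟨hz0, -⟩, rfl⟩ := hE
  omega

theorem pv_main (Emax : Int) : Naive_degeneracy Emax = Naive_degeneracy_alt Emax := by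
  rw [pvA_eq_flat]
  have hlenA : (((pvT Emax).filter (fun E => decide (E ≤ Emax))).foldl pvBump
      (List.replicate (Emax + 1).toNat 0)).length = (Emax + 1).toNat := by
    rw [pv_foldl_bump_length, List.length_replicate]
  have hlenB : (Naive_degeneracy_alt Emax).length = (Emax + 1).toNat := by
    simp [Naive_degeneracy_alt, PySem.List.length_pyRange_one]
  apply List.ext_getElem (by omega)
  intro k hk1 hk2
  have hn : k < (Emax + 1).toNat := by omega
  have hkE : (k : Int) ≤ Emax := by omega
  have hcond : ∀ E ∈ (pvT Emax).filter (fun E => decide (E ≤ Emax)),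
      0 ≤ E ∧ E < ((List.replicate (Emax + 1).toNat (0 : Int)).length : Int) := by
    intro E hE
    obtain ⟨hmemT, hle⟩ := List.mem_filter.1 hE
    have h0 := pv_mem_T_nonneg Emax E hmemT
    have hle' : E ≤ Emax := by simpa using hle
    simp only [List.length_replicate]
    constructor
    · exact h0
    · omega
  rw [← List.getD_eq_getElem _ (0 : Int) hk1,
    pv_foldl_bump_getD _ _ hcond k (by simpa using hn),
    List.count_filter (by simpa using hkE), pv_count_T Emax k hkE]
  simp only [Naive_degeneracy_alt, List.getElem_map, PySem.List.getElem_pyRange_one]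
  have hfd := PySem.Int.floordiv_natCast ((k + 1) * (k + 2)) 2
  push_cast at hfd
  rw [zero_add, hfd]
  simp

-- ===== VERDICT (by name: the statement is the Claim_ definition above) =====
theorem Naive_degeneracy_spec : Claim_equal_Naive_degeneracy := by
  intro Emax _
  exact pv_main Emax
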